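-- pv_equiv track=rewrite | github.com/zafrem/pii-pattern-engine | local_llm/generate_instruct_data.py | bio_tag_multi
-- ===== SOURCE A (Python) =====
-- def bio_tag_multi(text, pii_spans):
--     """BIO-tag a sentence with multiple PII spans.
--
--     pii_spans: list of (pii_value, tag_type) sorted by position in text.
--     """
--     # Build a character-level tag map
--     char_tags = ["O"] * len(text)
--     for pii_val, tag_type in pii_spans:
--         idx = text.find(pii_val)
--         if idx < 0:
--             continue
--         for i in range(idx, idx + len(pii_val)):
--             if i == idx:
--                 char_tags[i] = f"B-{tag_type}"
--             else:
--                 char_tags[i] = f"I-{tag_type}"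
--
--     # Tokenize by whitespace and assign tag per token
--     tokens = text.split()
--     result = []
--     pos = 0
--     for token in tokens:
--         # Find token start in original text
--         tok_start = text.find(token, pos)
--         if tok_start < 0:
--             tok_start = pos
--         tok_end = tok_start + len(token)
--         # Use the tag of the first character of the token
--         tag = char_tags[tok_start] if tok_start < len(char_tags) else "O"
--         # If it's I- but the previous token wasn't part of the same entity, use B-
--         if tag.startswith("I-"):
--             entity = tag[2:]
--             if not result or not result[-1].endswith(f"-{entity}"):
--                 tag = f"B-{entity}"
--         result.append(f"{token}/{tag}")
--         pos = tok_end
--     return " ".join(result)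
-- ===== SOURCE B (Python) =====
-- def bio_tag_multi(text, pii_spans):
--     """BIO-tag a sentence with multiple PII spans.
--
--     Interval-list rewrite: instead of a character-level tag array, keep the
--     found spans as (start, length, tag_type) intervals and, for each token
--     start, take the LAST interval covering it (= last-writer-wins of the
--     char array). Tokenization is done in a first pass that records each
--     token's start offset; a second pass assigns tags with the BIO fix.
--     """
--     spans = []
--     for pii_val, tag_type in pii_spans:
--         idx = text.find(pii_val)
--         if idx >= 0:
--             spans.append((idx, len(pii_val), tag_type))
--
--     def tag_at(p):
--         for idx, length, tag_type in reversed(spans):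
--             if idx <= p < idx + length:
--                 return ("B-" if p == idx else "I-") + tag_type
--         return "O"
--
--     # pass 1: token start offsets
--     starts = []
--     pos = 0
--     for token in text.split():
--         p = text.find(token, pos)
--         if p < 0:
--             p = pos
--         starts.append((token, p))
--         pos = p + len(token)
--
--     # pass 2: tags with BIO fix
--     result = []
--     for token, p in starts:
--         tag = tag_at(p)
--         if tag.startswith("I-"):
--             entity = tag[2:]
--             if not result or not result[-1].endswith("-" + entity):
--                 tag = "B-" + entity
--         result.append(token + "/" + tag)
--     return " ".join(result)
-- ===== Notes on version B (the rewrite author's own statement) =====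
-- stated objective: alternative
-- what changed: Replaces the character-level tag array (one write per covered character, overwriting on overlap) by a list of (start, length, tag) intervals resolved last-writer-wins at each token start, and splits the token loop into a start-offset pass and a tagging pass.
import Mathlib
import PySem

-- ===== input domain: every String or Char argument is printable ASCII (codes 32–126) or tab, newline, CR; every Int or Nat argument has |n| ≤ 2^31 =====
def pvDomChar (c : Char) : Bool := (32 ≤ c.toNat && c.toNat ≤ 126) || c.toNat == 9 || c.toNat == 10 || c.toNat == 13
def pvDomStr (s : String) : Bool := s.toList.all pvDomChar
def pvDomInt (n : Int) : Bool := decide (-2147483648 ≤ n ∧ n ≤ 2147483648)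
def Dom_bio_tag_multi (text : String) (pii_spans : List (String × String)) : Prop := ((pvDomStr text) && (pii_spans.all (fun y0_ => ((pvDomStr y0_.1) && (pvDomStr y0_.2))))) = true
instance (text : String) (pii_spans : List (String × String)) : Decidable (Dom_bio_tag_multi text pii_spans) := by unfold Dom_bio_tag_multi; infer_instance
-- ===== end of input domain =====

-- B replaces A's character-level tag array by a list of (start,length,tag) intervals
-- resolved last-writer-wins, and splits the token loop into a start-offset pass and a
-- tagging pass (objective: alternative data structure, same observable result).

-- ===== PORT A =====
-- BIO correction shared by both Pythons verbatim (identical lines in Source A and Source B).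
def pvBioFix (res : List (List Char)) (tag : List Char) : List Char :=
  if PySem.Chars.startswith tag "I-".toList then
    let entity := PySem.Chars.slice tag (some 2) none
    match res.getLast? with
    | none => "B-".toList ++ entity
    | some last => if PySem.Chars.endswith last ('-' :: entity) then tag else "B-".toList ++ entity
  else tag

-- char_tags: ["O"]*len(text), then per span overwrite the covered range.
def pvBuildTags (s : List Char) (pii_spans : List (String × String)) : List (List Char) :=
  pii_spans.foldl (fun ct pr =>
      let idx := PySem.Chars.find s pr.1.toList
      if idx < 0 then ct
      else (PySem.List.pyRange idx (idx + (pr.1.toList.length : Int))).foldl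
            (fun ct2 i =>
              ct2.set i.toNat (if i = idx then "B-".toList ++ pr.2.toList
                               else "I-".toList ++ pr.2.toList)) ct)
    (List.replicate s.length "O".toList)

-- the token loop of A: find token start from pos, read char_tags[tok_start] (guarded), BIO-fix, append
def pvTokLoopA (s : List Char) (ct : List (List Char)) :
    List (List Char) → List (List Char) → Int → List (List Char)
  | [], res, _ => res
  | tok :: rest, res, pos =>
    let ts0 := PySem.Chars.findFrom s tok pos
    let ts := if ts0 < 0 then pos else ts0
    let tag0 := if ts < (ct.length : Int) then (PySem.List.pyGet? ct ts).getD "O".toList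
                else "O".toList
    let tag := pvBioFix res tag0
    pvTokLoopA s ct rest (res ++ [tok ++ '/' :: tag]) (ts + (tok.length : Int))

def bio_tag_multi (text : String) (pii_spans : List (String × String)) : String :=
  let s := text.toList
  let charTags := pvBuildTags s pii_spans
  let tokens := PySem.Chars.split₀ s
  String.ofList (PySem.Chars.join " ".toList (pvTokLoopA s charTags tokens [] 0))

-- ===== PORT B =====
-- spans: the found intervals (start, length, tag_type), in input order
def pvBuildSpans (s : List Char) (pii_spans : List (String × String)) :
    List (Int × Int × List Char) :=
  pii_spans.foldl (fun acc pr =>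
      let idx := PySem.Chars.find s pr.1.toList
      if idx ≥ 0 then acc ++ [(idx, (pr.1.toList.length : Int), pr.2.toList)] else acc) []

-- tag_at: first covering interval of the REVERSED span list (last writer wins)
def pvTagAt : List (Int × Int × List Char) → Int → List Char
  | [], _ => "O".toList
  | (idx, len, tt) :: rest, p =>
    if idx ≤ p ∧ p < idx + len then (if p = idx then "B-".toList else "I-".toList) ++ tt
    else pvTagAt rest p

-- pass 1: (token, start offset) pairs
def pvStarts (s : List Char) : List (List Char) → Int → List (List Char × Int)
  | [], _ => []
  | tok :: rest, pos =>
    let p0 := PySem.Chars.findFrom s tok pos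
    let p := if p0 < 0 then pos else p0
    (tok, p) :: pvStarts s rest (p + (tok.length : Int))

-- pass 2: tag each token (rspans is the reversed span list), with the BIO fix
def pvTagPass (rspans : List (Int × Int × List Char)) :
    List (List Char × Int) → List (List Char) → List (List Char)
  | [], res => res
  | (tok, p) :: rest, res =>
    let tag := pvBioFix res (pvTagAt rspans p)
    pvTagPass rspans rest (res ++ [tok ++ '/' :: tag])

def bio_tag_multi_alt (text : String) (pii_spans : List (String × String)) : String :=
  let s := text.toList
  let spans := pvBuildSpans s pii_spans
  let starts := pvStarts s (PySem.Chars.split₀ s) 0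
  String.ofList (PySem.Chars.join " ".toList (pvTagPass spans.reverse starts []))

-- ===== PRECONDITION & SPEC =====
def Spec_bio_tag_multi (text : String) (pii_spans : List (String × String)) (out : String) : Prop := out = bio_tag_multi_alt text pii_spans
instance (text : String) (pii_spans : List (String × String)) (out : String) : Decidable (Spec_bio_tag_multi text pii_spans out) := by unfold Spec_bio_tag_multi; infer_instance

-- ===== CLAIM (what is proved, stated in full; the proofs are below) =====
def Claim_equal_bio_tag_multi : Prop := ∀ (text : String) (pii_spans : List (String × String)), Dom_bio_tag_multi text pii_spans → Spec_bio_tag_multi text pii_spans (bio_tag_multi text pii_spans)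

-- ===== LEMMAS AND PROOFS =====

-- writing into a list never changes its length
theorem pv_len_fold_set {α : Type} (l : List Int) (f : Int → α) :
    ∀ ct : List α, (l.foldl (fun c i => c.set i.toNat (f i)) ct).length = ct.length := by
  induction l with
  | nil => intro ct; rfl
  | cons a l ih => intro ct; simp [List.foldl, ih, List.length_set]

theorem pv_buildTags_length (s : List Char) (ps : List (String × String)) :
    (pvBuildTags s ps).length = s.length := by
  unfold pvBuildTags
  induction ps using List.reverseRecOn with
  | nil => simp
  | append_singleton l x ih =>
    rw [List.foldl_append]
    simp only [List.foldl]
    split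
    · exact ih
    · rw [pv_len_fold_set]; exact ih

-- lookup after the range write of one span
theorem pv_range_write_get {α : Type} (f : Int → α) (p : Nat) :
    ∀ (n : Nat) (a b : Int) (ct : List α), 0 ≤ a → b ≤ (ct.length : Int) → (b - a).toNat = n →
    ((PySem.List.pyRange a b).foldl (fun c i => c.set i.toNat (f i)) ct)[p]? =
      if a ≤ (p : Int) ∧ (p : Int) < b then some (f p) else ct[p]? := by
  intro n
  induction n with
  | zero =>
    intro a b ct ha hb hn
    have hba : b ≤ a := by omega
    have : PySem.List.pyRange a b = [] := by simp [PySem.List.pyRange]; omega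
    rw [this]
    simp only [List.foldl]
    have : ¬ (a ≤ (p : Int) ∧ (p : Int) < b) := by omega
    simp [this]
  | succ n ih =>
    intro a b ct ha hb hn
    have hab : a < b := by omega
    rw [PySem.List.pyRange_one_cons hab]
    simp only [List.foldl]
    rw [ih (a + 1) b (ct.set a.toNat (f a)) (by omega) (by simp [List.length_set]; omega) (by omega)]
    by_cases hc : a + 1 ≤ (p : Int) ∧ (p : Int) < b
    · simp [hc, show a ≤ (p : Int) ∧ (p : Int) < b by omega]
    · simp only [if_neg hc]
      rw [List.getElem?_set]
      by_cases hpa : (p : Int) = a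
      · have h1 : a.toNat = p := by omega
        have hpl : p < ct.length := by omega
        have h3 : a ≤ (p : Int) ∧ (p : Int) < b := by omega
        simp [h1, hpl, hpa]
        intro hba
        exact absurd hab (not_lt.mpr hba)
      · have h1 : ¬ a.toNat = p := by omega
        have h2 : ¬ (a ≤ (p : Int) ∧ (p : Int) < b) := by omega
        simp [h1, h2]

-- A's tag expression for position p (read of the char array with A's bounds guard)
def pvTagA (ct : List (List Char)) (p : Int) : List Char :=
  if p < (ct.length : Int) then (PySem.List.pyGet? ct p).getD "O".toList else "O".toList

-- the char array read at p equals the last-writer-wins interval lookup at p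
theorem pv_tag_agree (s : List Char) (ps : List (String × String)) (p : Int) (hp : 0 ≤ p) :
    pvTagA (pvBuildTags s ps) p = pvTagAt (pvBuildSpans s ps).reverse p := by
  induction ps using List.reverseRecOn with
  | nil =>
    unfold pvTagA pvBuildTags pvBuildSpans pvTagAt
    simp only [List.foldl]
    by_cases h : p < (s.length : Int)
    · rw [PySem.List.pyGet?_of_nonneg _ hp]
      simp only [List.length_replicate]
      rw [List.getElem?_replicate]
      have : p.toNat < s.length := by omega
      simp [h, this]
    · simp [h]
  | append_singleton l x ih =>
    have hlen : (pvBuildTags s l).length = s.length := pv_buildTags_length s l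
    have hTags : pvBuildTags s (l ++ [x]) =
        (let idx := PySem.Chars.find s x.1.toList
         if idx < 0 then pvBuildTags s l
         else (PySem.List.pyRange idx (idx + (x.1.toList.length : Int))).foldl
            (fun ct2 i =>
              ct2.set i.toNat (if i = idx then "B-".toList ++ x.2.toList
                               else "I-".toList ++ x.2.toList)) (pvBuildTags s l)) := by
      unfold pvBuildTags
      rw [List.foldl_append]
      simp only [List.foldl]
    have hSpans : pvBuildSpans s (l ++ [x]) =
        (let idx := PySem.Chars.find s x.1.toList
         if idx ≥ 0 then pvBuildSpans s l ++ [(idx, (x.1.toList.length : Int), x.2.toList)]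
         else pvBuildSpans s l) := by
      unfold pvBuildSpans
      rw [List.foldl_append]
      simp only [List.foldl]
    by_cases hidx : PySem.Chars.find s x.1.toList < 0
    · rw [hTags, hSpans]
      simp only [hidx, if_pos, if_neg (by omega : ¬ PySem.Chars.find s x.1.toList ≥ 0)]
      simpa using ih
    · -- the span was found: its range lies inside s
      have hidx' : 0 ≤ PySem.Chars.find s x.1.toList := by omega
      have hspec := PySem.Chars.find_spec (s := s) (sub := x.1.toList) hidx'
      have hbound : (PySem.Chars.find s x.1.toList) + (x.1.toList.length : Int) ≤ (s.length : Int) := by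
        have hle := hspec.1.length_le
        rw [List.length_drop] at hle
        have hfl := PySem.Chars.find_le_length (s := s) (sub := x.1.toList)
        omega
      set idx := PySem.Chars.find s x.1.toList with hidxdef
      rw [hTags, hSpans]
      simp only [if_neg (by omega : ¬ idx < 0), if_pos (by omega : idx ≥ 0)]
      rw [List.reverse_append]
      simp only [List.reverse_singleton, List.singleton_append]
      unfold pvTagA
      rw [pv_len_fold_set, hlen]
      unfold pvTagAt
      by_cases hcov : idx ≤ p ∧ p < idx + (x.1.toList.length : Int)
      · have hplen : p < (s.length : Int) := by omega
        rw [if_pos hplen, if_pos hcov]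
        rw [PySem.List.pyGet?_of_nonneg _ hp]
        rw [pv_range_write_get _ p.toNat ((idx + (x.1.toList.length : Int)) - idx).toNat idx _ _
              (by omega) (by omega) rfl]
        have : idx ≤ (p.toNat : Int) ∧ (p.toNat : Int) < idx + (x.1.toList.length : Int) := by omega
        rw [if_pos this]
        simp only [Option.getD_some]
        by_cases he : p = idx
        · rw [if_pos (by omega : (p.toNat : Int) = idx), if_pos he]
        · rw [if_neg (by omega : ¬ (p.toNat : Int) = idx), if_neg he]
      · rw [if_neg hcov]
        by_cases hplen : p < (s.length : Int)
        · rw [if_pos hplen]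
          rw [PySem.List.pyGet?_of_nonneg _ hp]
          rw [pv_range_write_get _ p.toNat ((idx + (x.1.toList.length : Int)) - idx).toNat idx _ _
                (by omega) (by omega) rfl]
          have : ¬ (idx ≤ (p.toNat : Int) ∧ (p.toNat : Int) < idx + (x.1.toList.length : Int)) := by
            omega
          rw [if_neg this]
          have ihx := ih
          unfold pvTagA at ihx
          rw [hlen, if_pos hplen, PySem.List.pyGet?_of_nonneg _ hp] at ihx
          exact ihx
        · rw [if_neg hplen]
          have ihx := ih
          unfold pvTagA at ihx
          rw [hlen, if_neg hplen] at ihx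
          exact ihx

-- the two token loops agree when the per-position tags agree
theorem pv_loop_agree (s : List Char) (ct : List (List Char))
    (rspans : List (Int × Int × List Char))
    (h : ∀ p : Int, 0 ≤ p → pvTagA ct p = pvTagAt rspans p) :
    ∀ (toks : List (List Char)) (res : List (List Char)) (pos : Int), 0 ≤ pos →
      pvTokLoopA s ct toks res pos = pvTagPass rspans (pvStarts s toks pos) res := by
  intro toks
  induction toks with
  | nil => intro res pos _; rfl
  | cons tok rest ih =>
    intro res pos hpos
    unfold pvTokLoopA pvStarts pvTagPass
    simp only
    set ts0 := PySem.Chars.findFrom s tok pos with hts0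
    set ts := if ts0 < 0 then pos else ts0 with hts
    have hts_nonneg : 0 ≤ ts := by
      rw [hts]; split <;> omega
    have htag := h ts hts_nonneg
    unfold pvTagA at htag
    rw [htag]
    exact ih (res ++ [tok ++ '/' :: pvBioFix res (pvTagAt rspans ts)]) (ts + (tok.length : Int))
      (by omega)

-- ===== VERDICT (by name: the statement is the Claim_ definition above) =====
theorem bio_tag_multi_spec : Claim_equal_bio_tag_multi := by
  intro text pii_spans _
  unfold Spec_bio_tag_multi bio_tag_multi bio_tag_multi_alt
  simp only
  congr 2
  exact pv_loop_agree text.toList (pvBuildTags text.toList pii_spans)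
    (pvBuildSpans text.toList pii_spans).reverse
    (fun p hp => pv_tag_agree text.toList pii_spans p hp)
    (PySem.Chars.split₀ text.toList) [] 0 le_rfl
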